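-- pv_equiv track=rewrite | github.com/sodiptabadiabanurea/thesiskit | src/thesiskit/templates/__init__.py | markdown_to_latex
-- ===== SOURCE A (Python) =====
-- def markdown_to_latex(md: str) -> str:
--     """Convert Markdown to LaTeX.
--
--     Simple conversion for common elements:
--     - Headers → sections
--     - Bold → textbf
--     - Italic → textit
--     - Code → texttt
--     - Lists → itemize
--     """
--     lines = md.split("\n")
--     latex_lines = []
--
--     in_list = False
--
--     for line in lines:
--         # Headers
--         if line.startswith("### "):
--             if in_list:
--                 latex_lines.append(r"\end{itemize}")
--                 in_list = False
--             latex_lines.append(r"\subsubsection{" + line[4:] + "}")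
--         elif line.startswith("## "):
--             if in_list:
--                 latex_lines.append(r"\end{itemize}")
--                 in_list = False
--             latex_lines.append(r"\section{" + line[3:] + "}")
--         elif line.startswith("# "):
--             if in_list:
--                 latex_lines.append(r"\end{itemize}")
--                 in_list = False
--             latex_lines.append(r"\section*{" + line[2:] + "}")
--         # Lists
--         elif line.startswith("- ") or line.startswith("* "):
--             if not in_list:
--                 latex_lines.append(r"\begin{itemize}")
--                 in_list = True
--             latex_lines.append(r"\item " + line[2:])
--         # Empty lines
--         elif not line.strip():
--             if in_list:
--                 latex_lines.append(r"\end{itemize}")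
--                 in_list = False
--             latex_lines.append("")
--         # Regular text
--         else:
--             if in_list:
--                 latex_lines.append(r"\end{itemize}")
--                 in_list = False
--             # Basic formatting
--             text = line
--             text = text.replace("**", r"\textbf{", 1).replace("**", "}", 1)
--             text = text.replace("*", r"\textit{", 1).replace("*", "}", 1)
--             text = text.replace("`", r"\texttt{", 1).replace("`", "}", 1)
--             latex_lines.append(text)
--
--     if in_list:
--         latex_lines.append(r"\end{itemize}")
--
--     return "\n".join(latex_lines)
-- ===== SOURCE B (Python) =====
-- def _fmt(line):
--     text = line
--     text = text.replace("**", r"\textbf{", 1).replace("**", "}", 1)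
--     text = text.replace("*", r"\textit{", 1).replace("*", "}", 1)
--     text = text.replace("`", r"\texttt{", 1).replace("`", "}", 1)
--     return text
--
--
-- def _is_item(line):
--     return line.startswith("- ") or line.startswith("* ")
--
--
-- def markdown_to_latex(md: str) -> str:
--     lines = md.split("\n")
--     out = []
--     i = 0
--     n = len(lines)
--     while i < n:
--         line = lines[i]
--         if _is_item(line):
--             out.append(r"\begin{itemize}")
--             while i < n and _is_item(lines[i]):
--                 out.append(r"\item " + lines[i][2:])
--                 i += 1
--             out.append(r"\end{itemize}")
--         else:
--             if line.startswith("### "):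
--                 out.append(r"\subsubsection{" + line[4:] + "}")
--             elif line.startswith("## "):
--                 out.append(r"\section{" + line[3:] + "}")
--             elif line.startswith("# "):
--                 out.append(r"\section*{" + line[2:] + "}")
--             elif not line.strip():
--                 out.append("")
--             else:
--                 out.append(_fmt(line))
--             i += 1
--     return "\n".join(out)
-- ===== Notes on version B (the rewrite author's own statement) =====
-- stated objective: alternative
-- what changed: Replaces A's carried in_list flag and close-before-every-branch bookkeeping with a grouped traversal that consumes each maximal run of consecutive list-item lines in one inner loop, emitting begin/end itemize around the run.
import Mathlib
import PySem

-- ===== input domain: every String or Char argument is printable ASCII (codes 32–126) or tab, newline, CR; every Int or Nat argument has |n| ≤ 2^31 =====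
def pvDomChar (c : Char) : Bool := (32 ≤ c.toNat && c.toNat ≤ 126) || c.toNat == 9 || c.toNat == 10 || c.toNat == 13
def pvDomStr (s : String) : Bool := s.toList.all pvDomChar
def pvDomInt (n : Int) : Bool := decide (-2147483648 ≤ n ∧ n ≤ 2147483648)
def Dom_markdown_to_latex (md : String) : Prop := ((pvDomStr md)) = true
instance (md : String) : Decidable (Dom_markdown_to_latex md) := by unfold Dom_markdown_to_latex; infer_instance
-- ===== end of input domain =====

-- B replaces A's carried `in_list` flag by consuming each maximal run of consecutive
-- list-item lines as a group (one inner recursion per run); same output, different decomposition.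

-- `s.replace(old, new, 1)` on char lists: replace the leftmost occurrence of `old`;
-- exact Python semantics for nonempty `old` (every call site below passes a nonempty literal).
def replaceOnce : List Char → List Char → List Char → List Char
  | [], _, _ => []
  | c :: cs, old, new =>
    if PySem.Chars.startswith (c :: cs) old then new ++ (c :: cs).drop old.length
    else c :: replaceOnce cs old new

-- ===== PORT A =====
-- A's loop body: state = (in_list, latex_lines), branches in A's order, formatting chain inline.
def mdStepA (st : Bool × List (List Char)) (line : List Char) : Bool × List (List Char) :=
  let inList := st.1
  let acc := st.2
  if PySem.Chars.startswith line "### ".toList then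
    let acc := if inList then acc ++ ["\\end{itemize}".toList] else acc
    (false, acc ++ ["\\subsubsection{".toList ++ line.drop 4 ++ "}".toList])
  else if PySem.Chars.startswith line "## ".toList then
    let acc := if inList then acc ++ ["\\end{itemize}".toList] else acc
    (false, acc ++ ["\\section{".toList ++ line.drop 3 ++ "}".toList])
  else if PySem.Chars.startswith line "# ".toList then
    let acc := if inList then acc ++ ["\\end{itemize}".toList] else acc
    (false, acc ++ ["\\section*{".toList ++ line.drop 2 ++ "}".toList])
  else if PySem.Chars.startswith line "- ".toList || PySem.Chars.startswith line "* ".toList then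
    let acc := if inList then acc else acc ++ ["\\begin{itemize}".toList]
    (true, acc ++ ["\\item ".toList ++ line.drop 2])
  else if PySem.Chars.strip line = [] then
    let acc := if inList then acc ++ ["\\end{itemize}".toList] else acc
    (false, acc ++ [[]])
  else
    let acc := if inList then acc ++ ["\\end{itemize}".toList] else acc
    let t := replaceOnce (replaceOnce line "**".toList "\\textbf{".toList) "**".toList "}".toList
    let t := replaceOnce (replaceOnce t "*".toList "\\textit{".toList) "*".toList "}".toList
    let t := replaceOnce (replaceOnce t "`".toList "\\texttt{".toList) "`".toList "}".toList
    (false, acc ++ [t])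

def markdown_to_latex (md : String) : String :=
  let lines := PySem.Chars.splitOn md.toList ['\n']
  let st := lines.foldl mdStepA (false, [])
  let out := if st.1 then st.2 ++ ["\\end{itemize}".toList] else st.2
  String.ofList (PySem.Chars.join ['\n'] out)

-- ===== PORT B =====
-- B's helper `_is_item`
def mdIsItem (line : List Char) : Bool :=
  PySem.Chars.startswith line "- ".toList || PySem.Chars.startswith line "* ".toList

-- B's helper `_fmt`
def mdFmt (line : List Char) : List Char :=
  let t := replaceOnce (replaceOnce line "**".toList "\\textbf{".toList) "**".toList "}".toList
  let t := replaceOnce (replaceOnce t "*".toList "\\textit{".toList) "*".toList "}".toList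
  replaceOnce (replaceOnce t "`".toList "\\texttt{".toList) "`".toList "}".toList

-- B's inner while loop: consume the maximal leading run of item lines,
-- returning the emitted `\item` lines and the remaining lines.
def mdItems : List (List Char) → List (List Char) × List (List Char)
  | [] => ([], [])
  | l :: ls =>
    if mdIsItem l then
      let p := mdItems ls
      (("\\item ".toList ++ l.drop 2) :: p.1, p.2)
    else ([], l :: ls)

-- needed by `mdLines` for termination
theorem mdItems_snd_le (ls : List (List Char)) : (mdItems ls).2.length ≤ ls.length := by
  induction ls with
  | nil => simp [mdItems]
  | cons l ls ih =>
    by_cases h : mdIsItem l = true <;> simp [mdItems, h] <;> omega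

-- B's outer while loop over the lines.
def mdLines : List (List Char) → List (List Char)
  | [] => []
  | l :: ls =>
    if mdIsItem l then
      let p := mdItems ls
      "\\begin{itemize}".toList :: ("\\item ".toList ++ l.drop 2) :: p.1
        ++ "\\end{itemize}".toList :: mdLines p.2
    else if PySem.Chars.startswith l "### ".toList then
      ("\\subsubsection{".toList ++ l.drop 4 ++ "}".toList) :: mdLines ls
    else if PySem.Chars.startswith l "## ".toList then
      ("\\section{".toList ++ l.drop 3 ++ "}".toList) :: mdLines ls
    else if PySem.Chars.startswith l "# ".toList then
      ("\\section*{".toList ++ l.drop 2 ++ "}".toList) :: mdLines ls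
    else if PySem.Chars.strip l = [] then
      [] :: mdLines ls
    else
      mdFmt l :: mdLines ls
termination_by ls => ls.length
decreasing_by
  all_goals simp
  all_goals try omega
  all_goals first | omega | exact mdItems_snd_le ls | exact Nat.lt_succ_of_le (mdItems_snd_le ls)

def markdown_to_latex_alt (md : String) : String :=
  String.ofList (PySem.Chars.join ['\n'] (mdLines (PySem.Chars.splitOn md.toList ['\n'])))

-- ===== PRECONDITION & SPEC =====
def Spec_markdown_to_latex (md : String) (out : String) : Prop := out = markdown_to_latex_alt md
instance (md : String) (out : String) : Decidable (Spec_markdown_to_latex md out) := by unfold Spec_markdown_to_latex; infer_instance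

-- ===== CLAIM (what is proved, stated in full; the proofs are below) =====
def Claim_equal_markdown_to_latex : Prop := ∀ (md : String), Dom_markdown_to_latex md → Spec_markdown_to_latex md (markdown_to_latex md)

-- ===== LEMMAS AND PROOFS =====

-- A's trailing `if in_list: append \end{itemize}` applied to the fold's final state.
def closeA (st : Bool × List (List Char)) : List (List Char) :=
  if st.1 then st.2 ++ ["\\end{itemize}".toList] else st.2

-- one-step unfolding lemmas for the well-founded `mdLines`
def mdHandle (l : List Char) : List Char :=
  if PySem.Chars.startswith l "### ".toList then "\\subsubsection{".toList ++ l.drop 4 ++ "}".toList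
  else if PySem.Chars.startswith l "## ".toList then "\\section{".toList ++ l.drop 3 ++ "}".toList
  else if PySem.Chars.startswith l "# ".toList then "\\section*{".toList ++ l.drop 2 ++ "}".toList
  else if PySem.Chars.strip l = [] then []
  else mdFmt l

theorem mdLines_nil : mdLines [] = [] := by rw [mdLines]

theorem mdLines_cons_item (l : List Char) (ls : List (List Char)) (h : mdIsItem l = true) :
    mdLines (l :: ls) = "\\begin{itemize}".toList :: ("\\item ".toList ++ l.drop 2) :: (mdItems ls).1
      ++ "\\end{itemize}".toList :: mdLines (mdItems ls).2 := by
  conv_lhs => rw [mdLines.eq_def]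
  simp [h]

theorem mdLines_cons_other (l : List Char) (ls : List (List Char)) (h : mdIsItem l = false) :
    mdLines (l :: ls) = mdHandle l :: mdLines ls := by
  conv_lhs => rw [mdLines.eq_def]
  simp only [h, Bool.false_eq_true, if_false, mdHandle]
  split_ifs <;> rfl

-- an item line starts with '-' or '*', hence with none of the header prefixes
theorem item_not_header (l : List Char) (h : mdIsItem l = true) :
    PySem.Chars.startswith l "### ".toList = false ∧
    PySem.Chars.startswith l "## ".toList = false ∧
    PySem.Chars.startswith l "# ".toList = false := by
  match l with
  | [] => simp [mdIsItem, PySem.Chars.startswith] at h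
  | c :: rest =>
    simp [mdIsItem, PySem.Chars.startswith] at h ⊢
    rcases h with ⟨h1, _⟩ | ⟨h1, _⟩ <;> subst h1 <;>
      refine ⟨by simp [List.isPrefixOf], by simp [List.isPrefixOf], by simp [List.isPrefixOf]⟩

-- the key invariant: A's fold (with final close) produces B's grouped output,
-- from a closed state (left conjunct) and from inside an open list (right conjunct)
theorem fold_eq_mdLines (ls : List (List Char)) : ∀ acc : List (List Char),
    closeA (ls.foldl mdStepA (false, acc)) = acc ++ mdLines ls ∧
    closeA (ls.foldl mdStepA (true, acc)) =
      acc ++ (mdItems ls).1 ++ "\\end{itemize}".toList :: mdLines (mdItems ls).2 := by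
  induction ls with
  | nil => intro acc; simp [closeA, mdLines_nil, mdItems]
  | cons l ls ih =>
    intro acc
    by_cases hi : mdIsItem l = true
    · obtain ⟨h3, h2, h1⟩ := item_not_header l hi
      have hi' : (PySem.Chars.startswith l "- ".toList || PySem.Chars.startswith l "* ".toList) = true := hi
      constructor
      · simp only [List.foldl_cons, mdStepA, h1, h2, h3, hi', if_false, if_true, Bool.false_eq_true, ite_false, ite_true]
        rw [(ih _).2]
        simp [mdLines_cons_item _ _ hi]
      · simp only [List.foldl_cons, mdStepA, h1, h2, h3, hi', ite_false, ite_true, Bool.false_eq_true]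
        rw [(ih _).2]
        simp [mdItems, hi]
    · have hi' : (PySem.Chars.startswith l "- ".toList || PySem.Chars.startswith l "* ".toList) = false := by
        simpa [mdIsItem] using hi
      have main : ∀ b : Bool, closeA ((l :: ls).foldl mdStepA (b, acc)) =
          (if b then acc ++ ["\\end{itemize}".toList] else acc) ++ mdLines (l :: ls) := by
        intro b
        simp only [List.foldl_cons]
        by_cases H3 : PySem.Chars.startswith l "### ".toList = true
        · simp only [mdStepA, H3, if_true]
          rw [(ih _).1, mdLines_cons_other _ _ (by simpa [mdIsItem] using hi)]
          simp only [mdHandle, H3, Bool.false_eq_true, if_false, if_true]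
          simp
        · by_cases H2 : PySem.Chars.startswith l "## ".toList = true
          · simp only [mdStepA, H3, H2, Bool.false_eq_true, if_false, if_true]
            rw [(ih _).1, mdLines_cons_other _ _ (by simpa [mdIsItem] using hi)]
            simp only [mdHandle, H3, H2, Bool.false_eq_true, if_false, if_true]
            simp
          · by_cases H1 : PySem.Chars.startswith l "# ".toList = true
            · simp only [mdStepA, H3, H2, H1, Bool.false_eq_true, if_false, if_true]
              rw [(ih _).1, mdLines_cons_other _ _ (by simpa [mdIsItem] using hi)]
              simp only [mdHandle, H3, H2, H1, Bool.false_eq_true, if_false, if_true]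
              simp
            · by_cases HS : PySem.Chars.strip l = []
              · simp only [mdStepA, H3, H2, H1, hi', HS, Bool.false_eq_true, if_false, if_true,
                  if_pos rfl]
                rw [(ih _).1, mdLines_cons_other _ _ (by simpa [mdIsItem] using hi)]
                simp only [mdHandle, H3, H2, H1, Bool.false_eq_true, if_false]
                simp [HS]
              · simp only [mdStepA, H3, H2, H1, hi', HS, Bool.false_eq_true, if_false]
                rw [(ih _).1, mdLines_cons_other _ _ (by simpa [mdIsItem] using hi)]
                simp only [mdHandle, H3, H2, H1, Bool.false_eq_true, if_false]
                simp [HS, mdFmt]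
      refine ⟨by simpa using main false, ?_⟩
      rw [main true]
      simp [mdItems, hi]
-- ===== VERDICT (by name: the statement is the Claim_ definition above) =====
theorem markdown_to_latex_spec : Claim_equal_markdown_to_latex := by
  intro md _
  show markdown_to_latex md = markdown_to_latex_alt md
  have h := (fold_eq_mdLines (PySem.Chars.splitOn md.toList ['\n']) []).1
  simp only [closeA] at h
  simp only [markdown_to_latex, markdown_to_latex_alt]
  rw [h]
  simp
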